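-- pv_equiv track=rewrite | github.com/mayz/brileta | brileta/environment/generators/pipeline/layers/buildings.py | _find_largest_contiguous_segment
-- ===== SOURCE A (Python) =====
-- def _find_largest_contiguous_segment(
--
--     candidates: list[tuple[int, int]],
--     direction: str,
-- ) -> list[tuple[int, int]]:
--     """Find the largest contiguous segment of door candidates.
--
--     When internal walls divide a building, candidates on the exterior wall
--     are split into segments. This finds the largest segment so the door
--     is placed in the center of a room, not at the edge where rooms meet.
--
--     Args:
--         candidates: List of (x, y) door candidate positions.
--         direction: Door direction ("N", "S", "E", "W").
--
--     Returns:
--         The largest contiguous segment of candidates.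
--     """
--     if len(candidates) <= 1:
--         return candidates
--
--     # Determine which coordinate varies (x for N/S walls, y for E/W walls)
--     is_horizontal = direction in ("N", "S")
--
--     # Sort by the varying coordinate
--     if is_horizontal:
--         sorted_candidates = sorted(candidates, key=lambda p: p[0])
--     else:
--         sorted_candidates = sorted(candidates, key=lambda p: p[1])
--
--     # Find contiguous segments (adjacent positions differ by 1)
--     segments: list[list[tuple[int, int]]] = []
--     current_segment: list[tuple[int, int]] = [sorted_candidates[0]]
--
--     for i in range(1, len(sorted_candidates)):
--         prev = sorted_candidates[i - 1]
--         curr = sorted_candidates[i]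
--
--         # Check if this position is adjacent to the previous
--         if is_horizontal:
--             is_adjacent = curr[0] == prev[0] + 1
--         else:
--             is_adjacent = curr[1] == prev[1] + 1
--
--         if is_adjacent:
--             current_segment.append(curr)
--         else:
--             segments.append(current_segment)
--             current_segment = [curr]
--
--     segments.append(current_segment)
--
--     # Return the largest segment
--     largest = segments[0]
--     for segment in segments[1:]:
--         if len(segment) > len(largest):
--             largest = segment
--     return largest
-- ===== SOURCE B (Python) =====
-- def _find_largest_contiguous_segment(
--     candidates: list[tuple[int, int]],
--     direction: str,
-- ) -> list[tuple[int, int]]: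
--     """Single pass over the sorted candidates tracking only run indices;
--     return the winning run as a slice at the end (no list of segments)."""
--     if len(candidates) <= 1:
--         return candidates
--
--     key = (lambda p: p[0]) if direction in ("N", "S") else (lambda p: p[1])
--     s = sorted(candidates, key=key)
--
--     best_start, best_len = 0, 1
--     cur_start = 0
--     for i in range(1, len(s)):
--         if key(s[i]) != key(s[i - 1]) + 1:
--             cur_start = i
--         if i - cur_start + 1 > best_len:
--             best_start, best_len = cur_start, i - cur_start + 1
--     return s[best_start:best_start + best_len]
-- ===== Notes on version B (the rewrite author's own statement) =====
-- stated objective: simpler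
-- what changed: Instead of materialising a list of all contiguous segments and then scanning it for the longest, B does one pass over the sorted list maintaining only the start index of the current run and the (start, length) of the best run, and returns a slice at the end.
import Mathlib
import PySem

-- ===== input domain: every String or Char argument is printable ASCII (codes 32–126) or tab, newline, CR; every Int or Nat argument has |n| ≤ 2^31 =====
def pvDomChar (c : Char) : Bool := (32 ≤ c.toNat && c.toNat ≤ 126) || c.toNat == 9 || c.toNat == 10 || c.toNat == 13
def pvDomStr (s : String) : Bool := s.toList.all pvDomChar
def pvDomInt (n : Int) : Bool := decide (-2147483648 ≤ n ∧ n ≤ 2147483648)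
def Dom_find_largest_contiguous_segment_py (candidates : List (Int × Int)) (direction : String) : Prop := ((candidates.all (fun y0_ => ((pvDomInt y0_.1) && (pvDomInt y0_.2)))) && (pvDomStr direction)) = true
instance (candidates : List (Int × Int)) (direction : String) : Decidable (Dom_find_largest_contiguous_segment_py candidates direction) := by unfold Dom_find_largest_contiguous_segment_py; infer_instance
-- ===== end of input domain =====

-- B replaces A's build-all-segments-then-scan with a single pass keeping only run
-- indices and a final slice (objective: simpler; same asymptotic cost).

-- ===== PORT A =====
-- the segment-building loop: for i in range(1, len(s)) with prev
def pvALoop (horiz : Bool) (prev : Int × Int) (rest : List (Int × Int))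
    (segments : List (List (Int × Int))) (current : List (Int × Int)) :
    List (List (Int × Int)) :=
  match rest with
  | [] => segments ++ [current]
  | curr :: rs =>
    let isAdj := if horiz then curr.1 == prev.1 + 1 else curr.2 == prev.2 + 1
    if isAdj then pvALoop horiz curr rs segments (current ++ [curr])
    else pvALoop horiz curr rs (segments ++ [current]) [curr]

-- largest = segments[0]; for segment in segments[1:]: if len(segment) > len(largest)
def pvPick (g : List (Int × Int)) (gs : List (List (Int × Int))) : List (Int × Int) :=
  gs.foldl (fun largest seg => if largest.length < seg.length then seg else largest) g

def find_largest_contiguous_segment_py (candidates : List (Int × Int)) (direction : String) : List (Int × Int) :=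
  if candidates.length ≤ 1 then candidates
  else
    let isHorizontal := direction == "N" || direction == "S"
    let sortedCandidates :=
      if isHorizontal then PySem.List.sorted candidates (fun p => p.1)
      else PySem.List.sorted candidates (fun p => p.2)
    match sortedCandidates with
    | [] => []  -- unreachable: candidates has ≥ 2 elements
    | p :: rest =>
      match pvALoop isHorizontal p rest [] [p] with
      | [] => []  -- unreachable: the loop always appends current_segment
      | g :: gs => pvPick g gs

-- ===== PORT B =====
-- single pass: for i in range(1, len(s)) maintaining cur_start, best_start, best_len
def pvBLoop (horiz : Bool) (prev : Int × Int) (rest : List (Int × Int))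
    (i curStart bestStart bestLen : Nat) : Nat × Nat :=
  match rest with
  | [] => (bestStart, bestLen)
  | curr :: rs =>
    let key := fun (p : Int × Int) => if horiz then p.1 else p.2
    let cs := if key curr == key prev + 1 then curStart else i
    if bestLen < i - cs + 1 then pvBLoop horiz curr rs (i + 1) cs cs (i - cs + 1)
    else pvBLoop horiz curr rs (i + 1) cs bestStart bestLen

def find_largest_contiguous_segment_py_alt (candidates : List (Int × Int)) (direction : String) : List (Int × Int) :=
  if candidates.length ≤ 1 then candidates
  else
    let horiz := direction == "N" || direction == "S"
    let s := PySem.List.sorted candidates (fun p => if horiz then p.1 else p.2)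
    match s with
    | [] => []  -- unreachable
    | p :: rest =>
      let (bs, bl) := pvBLoop horiz p rest 1 0 0 1
      PySem.List.slice s (some (bs : Int)) (some ((bs + bl : Nat) : Int))

-- ===== PRECONDITION & SPEC =====
def Spec_find_largest_contiguous_segment_py (candidates : List (Int × Int)) (direction : String) (out : List (Int × Int)) : Prop := out = find_largest_contiguous_segment_py_alt candidates direction
instance (candidates : List (Int × Int)) (direction : String) (out : List (Int × Int)) : Decidable (Spec_find_largest_contiguous_segment_py candidates direction out) := by unfold Spec_find_largest_contiguous_segment_py; infer_instance

-- ===== CLAIM (what is proved, stated in full; the proofs are below) =====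
def Claim_equal_find_largest_contiguous_segment_py : Prop := ∀ (candidates : List (Int × Int)) (direction : String), Dom_find_largest_contiguous_segment_py candidates direction → Spec_find_largest_contiguous_segment_py candidates direction (find_largest_contiguous_segment_py candidates direction)

-- ===== LEMMAS AND PROOFS =====

-- the result of A's final pick over a (never actually empty) segment list
def pvPickOf (l : List (List (Int × Int))) : List (Int × Int) :=
  match l with
  | [] => []
  | g :: gs => pvPick g gs

theorem pvPick_append (g : List (Int × Int)) (gs : List (List (Int × Int))) (x : List (Int × Int)) :
    pvPick g (gs ++ [x]) = if (pvPick g gs).length < x.length then x else pvPick g gs := by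
  simp [pvPick, List.foldl_append]

theorem pvPickOf_append (l : List (List (Int × Int))) (x : List (Int × Int)) (hl : l ≠ []) :
    pvPickOf (l ++ [x]) = if (pvPickOf l).length < x.length then x else pvPickOf l := by
  match l with
  | [] => exact absurd rfl hl
  | g :: gs => simp [pvPickOf, pvPick_append]

-- main invariant-carrying induction: A's loop + pick equals the slice named by B's loop
theorem pvLoopMain (horiz : Bool) (s : List (Int × Int)) :
    ∀ (rest : List (Int × Int)) (prev : Int × Int)
      (segments : List (List (Int × Int))) (current : List (Int × Int))
      (i cs bs bl : Nat),
      rest = s.drop i →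
      cs ≤ i →
      current = (s.drop cs).take (i - cs) →
      i - cs ≠ 0 →
      1 ≤ bl →
      bs + bl ≤ s.length →
      pvPickOf (segments ++ [current]) = (s.drop bs).take bl →
      pvPickOf (pvALoop horiz prev rest segments current)
        = (s.drop (pvBLoop horiz prev rest i cs bs bl).1).take (pvBLoop horiz prev rest i cs bs bl).2 := by
  intro rest
  induction rest with
  | nil =>
    intro prev segments current i cs bs bl _ _ _ _ _ _ hC
    simpa [pvALoop, pvBLoop] using hC
  | cons curr rs ih =>
    intro prev segments current i cs bs bl hrest hcs hcur hne hbl hbs hC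
    -- facts about positions
    have hdrop : s.drop i = curr :: rs := hrest.symm
    have hi_lt : i < s.length := by
      by_contra h
      have : s.drop i = [] := List.drop_eq_nil_of_le (by omega)
      simp [this] at hdrop
    have hgi : s[i]? = some curr := by
      have h0 : (s.drop i)[0]? = s[i + 0]? := List.getElem?_drop ..
      simpa [hdrop] using h0.symm
    have hrs : rs = s.drop (i + 1) := by
      have h6 := congrArg (List.drop 1) hdrop
      simpa [List.drop_drop, Nat.add_comm] using h6.symm
    -- the two adjacency tests are the same boolean
    have hadjeq : ((if horiz then curr.1 else curr.2) == (if horiz then prev.1 else prev.2) + 1)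
        = (if horiz then curr.1 == prev.1 + 1 else curr.2 == prev.2 + 1) := by
      cases horiz <;> rfl
    -- length of current
    have hcurlen : current.length = i - cs := by
      rw [hcur]; simp [List.length_take, List.length_drop]; omega
    have hculen' : (pvPickOf (segments ++ [current])).length = bl := by
      rw [hC]; simp [List.length_take, List.length_drop]; omega
    -- extending the current run by one element
    have hext : (s.drop cs).take (i - cs + 1) = current ++ [curr] := by
      have h1 : (s.drop cs)[i - cs]? = some curr := by
        rw [List.getElem?_drop]
        have h2 : cs + (i - cs) = i := by omega
        rw [h2]; simpa using hgi
      rw [List.take_add_one, h1, hcur]; rfl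
    simp only [pvALoop, pvBLoop, hadjeq]
    by_cases ha : (if horiz then curr.1 == prev.1 + 1 else curr.2 == prev.2 + 1) = true
    · -- adjacent: current grows
      simp only [ha, if_true]
      by_cases hgt : bl < i - cs + 1
      · rw [if_pos hgt]
        apply ih curr segments (current ++ [curr]) (i + 1) cs cs (i - cs + 1)
          hrs (by omega)
          (by rw [← hext]; congr 1; omega)
          (by omega) (by omega) (by omega)
        -- new pick is the grown current run
        rw [hext]
        rcases segments with _ | ⟨g, gs⟩
        · simp [pvPickOf, pvPick]
        · rw [pvPickOf_append _ _ (by simp)]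
          have hsplit := pvPickOf_append (g :: gs) current (by simp)
          have hpgs : (pvPickOf ((g :: gs) ++ [current])).length = bl := hculen'
          have hple : (pvPickOf (g :: gs)).length ≤ bl := by
            rw [hsplit] at hpgs
            split_ifs at hpgs with h
            · omega
            · omega
          rw [if_pos (by simp [hcurlen]; omega)]
      · rw [if_neg hgt]
        apply ih curr segments (current ++ [curr]) (i + 1) cs bs bl
          hrs (by omega)
          (by rw [← hext]; congr 1; omega)
          (by omega) hbl hbs
        -- pick unchanged: the grown run is still not longer than the best
        rcases segments with _ | ⟨g, gs⟩
        · -- segments = []: old pick = current, bl = current.length, contradiction with ¬hgt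
          exfalso
          have : bl = current.length := by
            simpa [pvPickOf, pvPick] using hculen'.symm
          omega
        · rw [pvPickOf_append _ _ (by simp)]
          have hpgs : (pvPickOf ((g :: gs) ++ [current])).length = bl := hculen'
          have hsplit := pvPickOf_append (g :: gs) current (by simp)
          -- the best is a completed segment here: its pick has length bl
          have hfeq : (pvPickOf (g :: gs)).length = bl := by
            rw [hsplit] at hpgs
            split_ifs at hpgs with h
            · omega
            · exact hpgs
          have hnew : ¬ (pvPickOf (g :: gs)).length < (current ++ [curr]).length := by
            simp [hcurlen]; omega
          rw [if_neg hnew, hC.symm, hsplit]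
          rw [if_neg (show ¬ (pvPickOf (g :: gs)).length < current.length by omega)]
    · -- not adjacent: close current, start a fresh run at i
      rw [Bool.not_eq_true] at ha
      simp only [ha, Bool.false_eq_true, if_false]
      have hno : ¬ bl < i - i + 1 := by omega
      rw [if_neg hno]
      apply ih curr (segments ++ [current]) [curr] (i + 1) i bs bl
        hrs (by omega)
        (by
          have h4 : i + 1 - i = 1 := by omega
          rw [h4, hdrop]
          simp)
        (by omega) hbl hbs
      -- pick unchanged when appending the fresh singleton run
      rw [pvPickOf_append _ _ (by simp)]
      have h5 : ¬ (pvPickOf (segments ++ [current])).length < ([curr] : List (Int × Int)).length := by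
        rw [hculen']; simp; omega
      rw [if_neg h5, hC]

-- the two ways of writing the sort key pick the same sorted list
theorem pvSortedIf (horiz : Bool) (c : List (Int × Int)) :
    (if horiz then PySem.List.sorted c (fun p => p.1) else PySem.List.sorted c (fun p => p.2))
      = PySem.List.sorted c (fun p => if horiz then p.1 else p.2) := by
  cases horiz <;> rfl

-- ===== VERDICT (by name: the statement is the Claim_ definition above) =====
theorem find_largest_contiguous_segment_py_spec : Claim_equal_find_largest_contiguous_segment_py := by
  intro candidates direction _
  unfold Spec_find_largest_contiguous_segment_py
  unfold find_largest_contiguous_segment_py find_largest_contiguous_segment_py_alt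
  by_cases hlen : candidates.length ≤ 1
  · simp [hlen]
  · simp only [if_neg hlen]
    generalize (direction == "N" || direction == "S") = horiz
    rw [pvSortedIf]
    have hslen : (PySem.List.sorted candidates (fun p => if horiz then p.1 else p.2)).length
        = candidates.length := PySem.List.length_sorted ..
    generalize hgen : PySem.List.sorted candidates (fun p => if horiz then p.1 else p.2) = s
    rw [hgen] at hslen
    rcases s with _ | ⟨p, rest⟩
    · exfalso; simp at hslen; omega
    · dsimp only
      rcases hB : pvBLoop horiz p rest 1 0 0 1 with ⟨bs, bl⟩
      dsimp only
      have hA : pvPickOf (pvALoop horiz p rest [] [p])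
          = ((p :: rest).drop (pvBLoop horiz p rest 1 0 0 1).1).take (pvBLoop horiz p rest 1 0 0 1).2 :=
        pvLoopMain horiz (p :: rest) rest p [] [p] 1 0 0 1 rfl (by omega) (by simp)
          (by omega) (by omega) (by simp) (by simp [pvPickOf, pvPick])
      rw [hB] at hA
      rw [Nat.cast_add, PySem.List.slice_natCast_add]
      exact hA
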